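-- pv_equiv track=rewrite | github.com/AlifSrSE/ProblemSolves | 1443B-savingTheCity.py | solve
-- ===== SOURCE A (Python) =====
-- def solve(a, b, map_str):
--     INF = 10000
--     result = 0
--     prev_index = -INF
--     # Count first segment cost
--     found_first = False
--     for i in range(len(map_str)):
--         if map_str[i] == '1':
--             if not found_first:
--                 result += a
--                 found_first = True
--             else:
--                 result += min(a, b * (i - prev_index - 1))
--             prev_index = i
--     return result
-- ===== SOURCE B (Python) =====
-- def solve(a, b, map_str):
--     if '1' not in map_str:
--         return 0
--     gaps = map_str.split('1')[1:-1]
--     return a + sum(min(a, b * len(g)) for g in gaps)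
-- ===== Notes on version B (the rewrite author's own statement) =====
-- stated objective: simpler
-- what changed: Replaces A's indexed scan with found_first flag and prev_index state by string operations: if '1' is absent return 0, otherwise split the string on '1' and sum min(a, b*len(gap)) over the interior pieces, plus a for the first '1'.
import Mathlib
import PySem

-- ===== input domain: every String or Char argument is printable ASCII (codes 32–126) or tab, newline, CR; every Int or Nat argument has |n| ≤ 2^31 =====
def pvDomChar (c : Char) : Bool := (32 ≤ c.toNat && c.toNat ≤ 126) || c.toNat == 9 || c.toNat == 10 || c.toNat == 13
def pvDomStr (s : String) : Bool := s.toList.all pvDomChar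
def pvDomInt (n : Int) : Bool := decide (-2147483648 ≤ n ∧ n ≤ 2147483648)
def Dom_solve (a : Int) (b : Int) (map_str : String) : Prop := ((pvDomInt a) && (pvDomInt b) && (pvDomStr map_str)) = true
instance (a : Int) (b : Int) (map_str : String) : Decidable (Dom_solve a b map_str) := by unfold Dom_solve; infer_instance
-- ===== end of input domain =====

-- B replaces A's indexed scan (found_first flag, prev_index state) by string operations:
-- split the string on '1' and sum min(a, b*len(gap)) over the interior pieces; objective: simpler.

-- ===== PORT A =====
-- one loop step of A: state (result, prev_index, found_first), pair (index, char)
def solveStep (a : Int) (b : Int) (st : Int × Int × Bool) (p : Int × Char) : Int × Int × Bool :=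
  if p.2 = '1' then
    if st.2.2 = false then (st.1 + a, p.1, true)
    else (st.1 + min a (b * (p.1 - st.2.1 - 1)), p.1, true)
  else st

def solve (a : Int) (b : Int) (map_str : String) : Int :=
  ((PySem.List.enumerate map_str.toList).foldl (solveStep a b) (0, -10000, false)).1

-- ===== PORT B =====
-- map_str.split('1') on a one-char separator is List.splitOn '1' (pieces in order, empty pieces kept,
-- '' splits to ['']); pieces[1:-1] is PySem.List.slice; sum(...) is List.sum over the mapped list.
def solve_alt (a : Int) (b : Int) (map_str : String) : Int :=
  if PySem.Str.isIn "1" map_str then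
    let gaps := PySem.List.slice (map_str.toList.splitOn '1') (some 1) (some (-1))
    a + (gaps.map (fun g => min a (b * (g.length : Int)))).sum
  else 0

-- ===== PRECONDITION & SPEC =====
def Spec_solve (a : Int) (b : Int) (map_str : String) (out : Int) : Prop := out = solve_alt a b map_str
instance (a : Int) (b : Int) (map_str : String) (out : Int) : Decidable (Spec_solve a b map_str out) := by unfold Spec_solve; infer_instance

-- ===== CLAIM (what is proved, stated in full; the proofs are below) =====
def Claim_equal_solve : Prop := ∀ (a : Int) (b : Int) (map_str : String), Dom_solve a b map_str → Spec_solve a b map_str (solve a b map_str)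

-- ===== LEMMAS AND PROOFS =====

-- cost of the gaps described by a piece list (after the first '1' was paid):
-- k = chars already passed since the previous '1'; each further piece up to the last '1' costs min(a, b*gap)
def costGaps (a b : Int) : Int → List (List Char) → Int
  | _, [] => 0
  | _, [_] => 0
  | k, g₁ :: g₂ :: rest => min a (b * (k + (g₁.length : Int))) + costGaps a b 0 (g₂ :: rest)

-- total cost read off the piece list of the whole string
def costFromStart (a b : Int) : List (List Char) → Int
  | [] => 0
  | [_] => 0
  | _ :: g :: rest => a + costGaps a b 0 (g :: rest)

theorem costGaps_modifyHead (a b k : Int) (c : Char) (sp : List (List Char)) (h : sp ≠ []) :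
    costGaps a b k (sp.modifyHead (List.cons c)) = costGaps a b (k + 1) sp := by
  match sp with
  | [g] => simp [costGaps]
  | g :: g' :: rest =>
      simp only [List.modifyHead, costGaps, List.length_cons]
      congr 2
      push_cast
      ring

theorem costFromStart_modifyHead (a b : Int) (c : Char) (sp : List (List Char)) (h : sp ≠ []) :
    costFromStart a b (sp.modifyHead (List.cons c)) = costFromStart a b sp := by
  match sp with
  | [g] => simp [costFromStart]
  | g :: g' :: rest => simp [costFromStart]

theorem foldl_true (a b : Int) (l : List Char) :
    ∀ (n r p : Int), ((PySem.List.enumerate l n).foldl (solveStep a b) (r, p, true)).1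
      = r + costGaps a b (n - p - 1) (List.splitOnP (· == '1') l) := by
  induction l with
  | nil => intro n r p; simp [PySem.List.enumerate_nil, List.splitOnP_nil, costGaps]
  | cons c t ih =>
      intro n r p
      rw [PySem.List.enumerate_cons, List.foldl_cons, List.splitOnP_cons]
      by_cases hc : c = '1'
      · simp only [hc, solveStep, if_true]
        norm_num
        rw [ih (n + 1) (r + min a (b * (n - p - 1))) n]
        rcases hsp : List.splitOnP (· == '1') t with _ | ⟨g, rest⟩
        · exact absurd hsp (List.splitOnP_ne_nil _ t)
        · simp [costGaps, add_assoc]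
      · simp only [solveStep, hc, if_false]
        norm_num [hc]
        rw [ih (n + 1) r p,
            costGaps_modifyHead a b (n - p - 1) c _ (List.splitOnP_ne_nil _ t)]
        ring_nf

theorem foldl_false (a b : Int) (l : List Char) :
    ∀ (n r p : Int), ((PySem.List.enumerate l n).foldl (solveStep a b) (r, p, false)).1
      = r + costFromStart a b (List.splitOnP (· == '1') l) := by
  induction l with
  | nil => intro n r p; simp [PySem.List.enumerate_nil, List.splitOnP_nil, costFromStart]
  | cons c t ih =>
      intro n r p
      rw [PySem.List.enumerate_cons, List.foldl_cons, List.splitOnP_cons]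
      by_cases hc : c = '1'
      · simp only [hc, solveStep]
        norm_num
        rw [foldl_true a b t (n + 1) (r + a) n]
        rcases hsp : List.splitOnP (· == '1') t with _ | ⟨g, rest⟩
        · exact absurd hsp (List.splitOnP_ne_nil _ t)
        · simp [costFromStart, add_assoc]
      · simp only [solveStep, hc, if_false]
        norm_num [hc]
        rw [ih (n + 1) r p,
            costFromStart_modifyHead a b c _ (List.splitOnP_ne_nil _ t)]

theorem two_le_splitOnP_length (l : List Char) (h : '1' ∈ l) :
    2 ≤ (List.splitOnP (· == '1') l).length := by
  induction l with
  | nil => cases h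
  | cons c t ih =>
      rw [List.splitOnP_cons]
      by_cases hc : c = '1'
      · simp only [hc, beq_self_eq_true, if_true, List.length_cons]
        have := List.splitOnP_ne_nil (· == '1') t
        cases hsp : List.splitOnP (· == '1') t with
        | nil => exact absurd hsp this
        | cons g rest => simp
      · have hm : '1' ∈ t := by
          rcases List.mem_cons.mp h with h' | h'
          · exact absurd h'.symm hc
          · exact h'
        simp only [beq_iff_eq, hc, if_false, List.length_modifyHead]
        exact ih hm

theorem splitOnP_no_one (l : List Char) (h : '1' ∉ l) :
    List.splitOnP (· == '1') l = [l] :=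
  List.splitOnP_eq_single _ _ (fun x hx => by simp; rintro rfl; exact h hx)

theorem slice_one_neg_one {α : Type} (x y : α) (zs : List α) :
    PySem.List.slice (x :: y :: zs) (some 1) (some (-1)) = (y :: zs).dropLast := by
  have h1 : PySem.List.clampIdx (x :: y :: zs).length 1 = 1 := by
    simp only [PySem.List.clampIdx, List.length_cons]
    split_ifs <;> omega
  have h2 : PySem.List.clampIdx (x :: y :: zs).length (-1) = zs.length + 1 := by
    simp only [PySem.List.clampIdx, List.length_cons]
    split_ifs <;> omega
  rw [show PySem.List.slice (x :: y :: zs) (some 1) (some (-1))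
        = List.take (PySem.List.clampIdx (x :: y :: zs).length (-1)
            - PySem.List.clampIdx (x :: y :: zs).length 1)
            (List.drop (PySem.List.clampIdx (x :: y :: zs).length 1) (x :: y :: zs)) from rfl]
  rw [h1, h2]
  simp [List.dropLast_eq_take]

theorem costGaps_zero_eq_sum (a b : Int) (gs : List (List Char)) (h : gs ≠ []) :
    costGaps a b 0 gs = (gs.dropLast.map (fun g => min a (b * (g.length : Int)))).sum := by
  induction gs with
  | nil => exact absurd rfl h
  | cons g rest ih =>
      cases rest with
      | nil => simp [costGaps]
      | cons g₂ rest' =>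
          rw [List.dropLast_cons_of_ne_nil (by simp)]
          simp only [costGaps, List.map_cons, List.sum_cons, zero_add]
          rw [ih (by simp)]

theorem isIn_one_iff (s : String) : PySem.Str.isIn "1" s = true ↔ '1' ∈ s.toList := by
  rw [PySem.Str.isIn_iff_infix]
  have h1 : "1".toList = ['1'] := by decide
  rw [h1]
  constructor
  · intro h; exact h.subset (List.mem_singleton_self _)
  · intro h
    rcases List.append_of_mem h with ⟨u, v, huv⟩
    exact ⟨u, v, by simp [huv]⟩

-- ===== VERDICT (by name: the statement is the Claim_ definition above) =====
theorem solve_spec : Claim_equal_solve := by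
  intro a b s _
  unfold Spec_solve solve solve_alt
  rw [foldl_false a b s.toList 0 0 (-10000), zero_add]
  by_cases h : PySem.Str.isIn "1" s = true
  · rw [if_pos h]
    have hm : '1' ∈ s.toList := (isIn_one_iff s).mp h
    have h2 := two_le_splitOnP_length s.toList hm
    rcases hsp : List.splitOnP (· == '1') s.toList with _ | ⟨x, _ | ⟨y, zs⟩⟩
    · exact absurd hsp (List.splitOnP_ne_nil _ _)
    · rw [hsp] at h2; simp at h2
    · rw [show s.toList.splitOn '1' = List.splitOnP (· == '1') s.toList from rfl, hsp,
          slice_one_neg_one]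
      simp only [costFromStart]
      rw [costGaps_zero_eq_sum a b (y :: zs) (by simp)]
  · rw [if_neg h]
    have hm : '1' ∉ s.toList := by
      intro hmem
      exact h ((isIn_one_iff s).mpr hmem)
    rw [splitOnP_no_one s.toList hm]
    simp [costFromStart]
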